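-- pv_equiv track=rewrite | github.com/abbosnlpdev/UzMorfTahlil | src/UzMorphAnalyser/UzMorphAnalyser.py | __GeneratedAllomorph
-- ===== SOURCE A (Python) =====
-- def __GeneratedAllomorph(affix): #return a list that contain all allomorphs of the current affix
--     GenAff=[]
--     #if allomorph has omitted letter # qavsli faqat affix boshida keladi
--     parentesis = False # is exist parentesis
--     affix_v1, affix_v2 = "", "" # v1-qavs ichidagi bn, v2-qavs ichidagisiz qushimcha
--     uc_v1, uc_v2 = -1, -1   # postion of uppercase in affix
--
--     if affix[0] == "(":
--         affix_v1 = affix.replace("(", "").replace(")","")   # affix[1]+affix[3:] #qavs ichidagi bilan olish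
--         affix_v2 = affix[affix.find(")")+1:]  # qavs ichidagisiz olish
--         parentesis = True
--     else:
--         affix_v1 = affix
--
--     #if allomorph has uppper letter (several letters)
--     for i in range(len(affix_v1)):
--         if affix_v1[i].isupper():
--             uc_v1 = i
--             break
--     for i in range(len(affix_v2)):
--         if affix_v2[i].isupper():
--             uc_v2 = i
--             break
--
--     if uc_v1 > -1:
--         if affix_v1[uc_v1] == "G": #G:g,k,q
--             GenAff.append(affix_v1[:uc_v1] + "g" + affix_v1[uc_v1+1:])
--             GenAff.append(affix_v1[:uc_v1] + "k" + affix_v1[uc_v1 + 1:])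
--             GenAff.append(affix_v1[:uc_v1] + "q" + affix_v1[uc_v1 + 1:])
--         if affix_v1[uc_v1] == "K":  # K:g,k
--             GenAff.append(affix_v1[:uc_v1] + "g" + affix_v1[uc_v1 + 1:])
--             GenAff.append(affix_v1[:uc_v1] + "k" + affix_v1[uc_v1 + 1:])
--         if affix_v1[uc_v1] == "Y":  # Y:a,y
--             GenAff.append(affix_v1[:uc_v1] + "a" + affix_v1[uc_v1 + 1:])
--             GenAff.append(affix_v1[:uc_v1] + "y" + affix_v1[uc_v1 + 1:])
--         if affix_v1[uc_v1] == "T":  # T:t,d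
--             GenAff.append(affix_v1[:uc_v1] + "t" + affix_v1[uc_v1 + 1:])
--             GenAff.append(affix_v1[:uc_v1] + "d" + affix_v1[uc_v1 + 1:])
--         if affix_v1[uc_v1] == "Q":  # Q:g,g',k,q
--             GenAff.append(affix_v1[:uc_v1] + "g" + affix_v1[uc_v1 + 1:])
--             GenAff.append(affix_v1[:uc_v1] + "gʻ" + affix_v1[uc_v1 + 1:])
--             GenAff.append(affix_v1[:uc_v1] + "k" + affix_v1[uc_v1 + 1:])
--             GenAff.append(affix_v1[:uc_v1] + "q" + affix_v1[uc_v1 + 1:])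
--
--         if uc_v2 > -1: # bu uc_v1 bulgandagina bulishi mumkin, shuni uchun uni ichida
--             if affix_v2[uc_v2] == "G":  # G:g,k,q
--                 GenAff.append(affix_v2[:uc_v2] + "g" + affix_v2[uc_v2 + 1:])
--                 GenAff.append(affix_v2[:uc_v2] + "k" + affix_v2[uc_v2 + 1:])
--                 GenAff.append(affix_v2[:uc_v2] + "q" + affix_v2[uc_v2 + 1:])
--             if affix_v2[uc_v2] == "K":  # K:g,k
--                 GenAff.append(affix_v2[:uc_v2] + "g" + affix_v2[uc_v2 + 1:])
--                 GenAff.append(affix_v2[:uc_v2] + "k" + affix_v2[uc_v2 + 1:])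
--             if affix_v2[uc_v2] == "Y":  # Y:a,y
--                 GenAff.append(affix_v2[:uc_v2] + "a" + affix_v2[uc_v2 + 1:])
--                 GenAff.append(affix_v2[:uc_v2] + "y" + affix_v2[uc_v2 + 1:])
--             if affix_v2[uc_v2] == "T":  # T:t,d
--                 GenAff.append(affix_v2[:uc_v2] + "t" + affix_v2[uc_v2 + 1:])
--                 GenAff.append(affix_v2[:uc_v2] + "d" + affix_v2[uc_v2 + 1:])
--             if affix_v2[uc_v2] == "Q":  # Q:g,g',k,q
--                 GenAff.append(affix_v2[:uc_v2] + "g" + affix_v2[uc_v2 + 1:])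
--                 GenAff.append(affix_v2[:uc_v2] + "gʻ" + affix_v2[uc_v2 + 1:])
--                 GenAff.append(affix_v2[:uc_v2] + "k" + affix_v2[uc_v2 + 1:])
--                 GenAff.append(affix_v2[:uc_v2] + "q" + affix_v2[uc_v2 + 1:])
--
--         return GenAff
--
--     if parentesis: # agar yuqorida return bub ketmasa
--         GenAff.append(affix_v1)
--         GenAff.append(affix_v2)
--     else:
--         GenAff.append(affix)
--     return GenAff
-- ===== SOURCE B (Python) =====
-- # Re-implementation: instead of locating the first uppercase index and splicing
-- # slices, _expand consumes the string through an iterator, stacking ordinary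
-- # letters on the way down; at the first uppercase it substitutes the table
-- # entries before the rest of the iterator, then unwinds the stack, prepending
-- # each stacked letter to every variant; None signals "no uppercase at all".
-- _TABLE = {'G': ['g', 'k', 'q'],
--           'K': ['g', 'k'],
--           'Y': ['a', 'y'],
--           'T': ['t', 'd'],
--           'Q': ['g', 'g\u02bb', 'k', 'q']}
--
--
-- def _expand(s):
--     stack = []
--     cs = iter(s)
--     for c in cs:
--         if c.isupper():
--             suffix = ''.join(cs)
--             out = [r + suffix for r in _TABLE.get(c, [])]
--             while stack:
--                 p = stack.pop()
--                 out = [p + t for t in out]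
--             return out
--         stack.append(c)
--     return None
--
--
-- def __GeneratedAllomorph(affix):
--     if affix[0] == "(":
--         v1 = "".join(c for c in affix if c not in "()")
--         v2 = affix[affix.find(")") + 1:]
--         e1 = _expand(v1)
--         if e1 is None:
--             return [v1, v2]
--         e2 = _expand(v2)
--         return e1 + (e2 if e2 is not None else [])
--     e = _expand(affix)
--     return e if e is not None else [affix]
-- ===== Notes on version B (the rewrite author's own statement) =====
-- stated objective: alternative
-- what changed: Replaces A's first-uppercase index scan, slice-based splicing and duplicated five-way if-chains by a single descend/ascend pass over an iterator: ordinary letters are stacked on the way down, the first uppercase is substituted from a marker table before the remaining suffix, and the stack is unwound prepending each letter to every variant (None meaning no uppercase); the parenthesis stripping becomes a character filter instead of two replace calls.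
import Mathlib
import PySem

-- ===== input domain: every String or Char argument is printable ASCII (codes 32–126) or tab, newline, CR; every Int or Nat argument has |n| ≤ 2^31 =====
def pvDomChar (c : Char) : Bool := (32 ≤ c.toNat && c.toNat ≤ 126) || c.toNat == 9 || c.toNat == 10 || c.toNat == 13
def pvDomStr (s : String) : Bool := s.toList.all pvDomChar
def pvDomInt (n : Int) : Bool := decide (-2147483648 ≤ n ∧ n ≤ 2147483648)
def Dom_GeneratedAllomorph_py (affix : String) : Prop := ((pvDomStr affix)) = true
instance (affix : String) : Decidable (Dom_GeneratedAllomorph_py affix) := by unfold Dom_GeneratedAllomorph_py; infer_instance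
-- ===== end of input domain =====

-- B replaces A's first-uppercase index scan + slice splicing + duplicated if-chains by a
-- descend/ascend pass: stack ordinary letters going down, substitute the table entries at the
-- first uppercase, then unwind the stack prepending each letter to every variant (objective: alternative).

-- ===== PORT A =====
-- A's index loop 'for i in range(len(s)): if s[i].isupper(): uc = i; break' (−1 if none)
def ucLoopA (s : List Char) (i : Nat) : Int :=
  if h : i < s.length then
    if PySem.Chars.isupper s[i] then (i : Int) else ucLoopA s (i + 1)
  else -1
termination_by s.length - i

-- A's block of five sequential 'if …: GenAff.append(…)' chains, threading the accumulator;
-- s[uc] read with getD (uc is always in range at the call sites, guarded by uc > -1)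
def genAppendA (s : List Char) (i : Nat) (acc : List String) : List String :=
  let c := s.getD i ' '
  let pre := String.ofList (s.take i)
  let suf := String.ofList (s.drop (i + 1))
  let acc := if c = 'G' then acc ++ [pre ++ "g" ++ suf, pre ++ "k" ++ suf, pre ++ "q" ++ suf] else acc
  let acc := if c = 'K' then acc ++ [pre ++ "g" ++ suf, pre ++ "k" ++ suf] else acc
  let acc := if c = 'Y' then acc ++ [pre ++ "a" ++ suf, pre ++ "y" ++ suf] else acc
  let acc := if c = 'T' then acc ++ [pre ++ "t" ++ suf, pre ++ "d" ++ suf] else acc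
  let acc := if c = 'Q' then acc ++ [pre ++ "g" ++ suf, pre ++ "gʻ" ++ suf, pre ++ "k" ++ suf, pre ++ "q" ++ suf] else acc
  acc

def GeneratedAllomorph_py (affix : String) : List String :=
  let a := affix.toList
  -- affix[0] raises IndexError on "" (excluded by Pre_); here pyGet? [] 0 = none falls to the else-branch
  let parentesis := PySem.List.pyGet? a 0 == some '('
  let affix_v1 := if parentesis then PySem.Chars.replace (PySem.Chars.replace a ['('] []) [')'] [] else a
  let affix_v2 := if parentesis then PySem.List.slice a (some (PySem.Chars.find a [')'] + 1)) none else ([] : List Char)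
  let uc_v1 := ucLoopA affix_v1 0
  let uc_v2 := ucLoopA affix_v2 0
  if uc_v1 > -1 then
    let gen := genAppendA affix_v1 uc_v1.toNat []
    let gen := if uc_v2 > -1 then genAppendA affix_v2 uc_v2.toNat gen else gen
    gen
  else
    if parentesis then [String.ofList affix_v1, String.ofList affix_v2] else [affix]

-- ===== PORT B =====
def tableB : List (Char × List String) :=
  [('G', ["g", "k", "q"]), ('K', ["g", "k"]), ('Y', ["a", "y"]), ('T', ["t", "d"]),
   ('Q', ["g", "gʻ", "k", "q"])]

-- B's _expand: descend stacking ordinary letters; at the first uppercase substitute the table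
-- entries before the remaining suffix; none = no uppercase anywhere
def ascendB : List Char → List String → List String
  | [], out => out
  | p :: stack, out => ascendB stack (out.map (fun t => String.ofList [p] ++ t))

def expandDescB : List Char → List Char → Option (List String)
  | _, [] => none
  | stack, c :: rest =>
    if PySem.Chars.isupper c then
      some (ascendB stack (((tableB.lookup c).getD []).map (fun r => r ++ String.ofList rest)))
    else expandDescB (c :: stack) rest

def GeneratedAllomorph_py_alt (affix : String) : List String :=
  let a := affix.toList
  if PySem.List.pyGet? a 0 == some '(' then
    let v1 := a.filter (fun c => !(c == '(' || c == ')'))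
    let v2 := PySem.List.slice a (some (PySem.Chars.find a [')'] + 1)) none
    match expandDescB [] v1 with
    | none => [String.ofList v1, String.ofList v2]
    | some e1 => e1 ++ ((expandDescB [] v2).getD [])
  else
    match expandDescB [] a with
    | none => [affix]
    | some e => e

-- ===== PRECONDITION & SPEC =====
-- A evaluates affix[0], which raises IndexError on the empty string; Pre_ excludes exactly that input.
def Pre_GeneratedAllomorph_py (affix : String) : Prop := affix ≠ ""
instance (affix : String) : Decidable (Pre_GeneratedAllomorph_py affix) := by
  unfold Pre_GeneratedAllomorph_py; infer_instance
def pvWitness_GeneratedAllomorph_py : String := "(i)Gan"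

def Spec_GeneratedAllomorph_py (affix : String) (out : List String) : Prop := out = GeneratedAllomorph_py_alt affix
instance (affix : String) (out : List String) : Decidable (Spec_GeneratedAllomorph_py affix out) := by unfold Spec_GeneratedAllomorph_py; infer_instance

-- ===== CLAIM =====
def Claim_equal_GeneratedAllomorph_py : Prop := ∀ (affix : String), Dom_GeneratedAllomorph_py affix → Pre_GeneratedAllomorph_py affix → Spec_GeneratedAllomorph_py affix (GeneratedAllomorph_py affix)

-- ===== LEMMAS AND PROOFS =====

-- first-uppercase position as an Option, the common ladder between the two ports
def fuIdx : List Char → Option Nat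
  | [] => none
  | c :: t => if PySem.Chars.isupper c then some 0 else (fuIdx t).map (· + 1)

-- recursive reformulation of B's descend/ascend pass, used only in the proofs
def expandB : List Char → Option (List String)
  | [] => none
  | c :: rest =>
    if PySem.Chars.isupper c then
      some (((tableB.lookup c).getD []).map (fun r => r ++ String.ofList rest))
    else
      (expandB rest).map (fun l => l.map (fun t => String.ofList [c] ++ t))

theorem expandDescB_expandB (s stack : List Char) :
    expandDescB stack s = (expandB s).map (fun l => ascendB stack l) := by
  induction s generalizing stack with
  | nil => simp [expandDescB, expandB]
  | cons c rest ih =>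
    rw [expandDescB, expandB]
    by_cases hu : PySem.Chars.isupper c
    · simp [hu]
    · simp only [hu, Bool.false_eq_true, if_false, ih, Option.map_map]
      cases expandB rest with
      | none => simp
      | some l => simp [ascendB]

theorem expandDescB_nil (s : List Char) : expandDescB [] s = expandB s := by
  rw [expandDescB_expandB]
  cases expandB s <;> simp [ascendB]

-- the substitution list at position n, the common value of A's if-chain and B's table map
def tblAt (s : List Char) (n : Nat) : List String :=
  ((tableB.lookup (s.getD n ' ')).getD []).map
    (fun r => String.ofList (s.take n) ++ r ++ String.ofList (s.drop (n + 1)))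

theorem ucLoopA_fuIdx (s : List Char) (i : Nat) :
    ucLoopA s i = (fuIdx (s.drop i)).elim (-1) (fun n => ((i + n : Nat) : Int)) := by
  rw [ucLoopA]
  by_cases h : i < s.length
  · rw [List.drop_eq_getElem_cons h]
    simp only [h, dif_pos, fuIdx]
    by_cases hu : PySem.Chars.isupper s[i]
    · simp [hu]
    · simp only [hu, Bool.false_eq_true, if_false]
      rw [ucLoopA_fuIdx s (i + 1)]
      cases fuIdx (s.drop (i + 1)) with
      | none => simp
      | some n => simp only [Option.map_some, Option.elim_some]; push_cast; ring
  · simp [h, List.drop_eq_nil_of_le (Nat.le_of_not_lt h), fuIdx]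
termination_by s.length - i

theorem genAppendA_tblAt (s : List Char) (i : Nat) (acc : List String) :
    genAppendA s i acc = acc ++ tblAt s i := by
  unfold genAppendA tblAt tableB
  generalize s.getD i ' ' = c
  by_cases hG : c = 'G'
  · simp [hG, List.lookup]
  · by_cases hK : c = 'K'
    · simp [hK, List.lookup]
    · by_cases hY : c = 'Y'
      · simp [hY, List.lookup]
      · by_cases hT : c = 'T'
        · simp [hT, List.lookup]
        · by_cases hQ : c = 'Q'
          · simp [hQ, List.lookup]
          · have bG : (c == 'G') = false := by simp [hG]
            have bK : (c == 'K') = false := by simp [hK]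
            have bY : (c == 'Y') = false := by simp [hY]
            have bT : (c == 'T') = false := by simp [hT]
            have bQ : (c == 'Q') = false := by simp [hQ]
            simp [List.lookup, bG, bK, bY, bT, bQ, hG, hK, hY, hT, hQ]

theorem expandB_fuIdx (s : List Char) :
    expandB s = (fuIdx s).map (fun n => tblAt s n) := by
  induction s with
  | nil => simp [expandB, fuIdx]
  | cons c t ih =>
    rw [expandB, fuIdx]
    by_cases hu : PySem.Chars.isupper c
    · simp only [hu, if_pos, Option.map_some]
      unfold tblAt
      simp
    · simp only [hu, Bool.false_eq_true, if_false, ih, Option.map_map]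
      cases fuIdx t with
      | none => simp
      | some n =>
        simp only [Option.map_some, Option.some.injEq, Function.comp]
        unfold tblAt
        simp only [List.getD_cons_succ, List.take_succ_cons, List.drop_succ_cons,
          List.map_map]
        apply List.map_congr_left
        intro r _
        apply String.toList_injective
        simp

-- A's replace-with-empty of a single character equals B's filter
theorem replaceGo_filter (p : Char) (fuel : Nat) (l acc : List Char) (h : l.length ≤ fuel) :
    PySem.Chars.replace.go [p] [] fuel l acc = acc.reverse ++ l.filter (fun c => !(c == p)) := by
  induction fuel generalizing l acc with
  | zero =>
    have : l = [] := List.eq_nil_of_length_eq_zero (Nat.le_zero.mp h)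
    subst this
    simp [PySem.Chars.replace.go]
  | succ n ih =>
    cases l with
    | nil => simp [PySem.Chars.replace.go]
    | cons c t =>
      rw [PySem.Chars.replace.go]
      by_cases hc : c = p
      · subst hc
        have hp : [c].isPrefixOf (c :: t) = true := by simp [List.isPrefixOf]
        simp only [hp, if_pos, List.length_cons, List.length_nil, List.drop_succ_cons,
          List.drop_zero, List.reverse_nil, List.nil_append]
        rw [ih t acc (by simpa using Nat.le_of_succ_le_succ h)]
        simp
      · have hp : [c].isPrefixOf (c :: t) = true := by simp [List.isPrefixOf]
        have hps : ([p].isPrefixOf (c :: t)) = false := by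
          simp [List.isPrefixOf]
          exact fun he => absurd he.symm hc
        simp only [hps, Bool.false_eq_true, if_false]
        rw [ih t (c :: acc) (by simpa using Nat.le_of_succ_le_succ h)]
        have : (c == p) = false := by simp [hc]
        simp [this]

theorem replace_empty_filter (p : Char) (s : List Char) :
    PySem.Chars.replace s [p] [] = s.filter (fun c => !(c == p)) := by
  rw [PySem.Chars.replace]
  simp only [List.isEmpty_cons, Bool.false_eq_true, if_false]
  simpa using replaceGo_filter p s.length s [] (le_refl _)

theorem double_replace_filter (s : List Char) :
    PySem.Chars.replace (PySem.Chars.replace s ['('] []) [')'] []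
      = s.filter (fun c => !(c == '(' || c == ')')) := by
  rw [replace_empty_filter, replace_empty_filter, List.filter_filter]
  apply List.filter_congr
  intro c _
  cases hq : (c == '(') <;> cases hr : (c == ')') <;> simp_all

-- the common core: A's guarded uc-scan + if-chain equals B's recursive expand on one string
theorem core_eq (v : List Char) (acc : List String) :
    (if ucLoopA v 0 > -1 then genAppendA v (ucLoopA v 0).toNat acc else acc)
      = acc ++ ((expandB v).getD []) := by
  rw [ucLoopA_fuIdx, expandB_fuIdx]
  simp only [List.drop_zero]
  cases h : fuIdx v with
  | none => simp
  | some n =>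
    have hn : (-1 : Int) < (n : Int) := by omega
    simp [hn, genAppendA_tblAt]

theorem ucLoop_none_iff (v : List Char) : ¬ ucLoopA v 0 > -1 ↔ expandB v = none := by
  rw [ucLoopA_fuIdx, expandB_fuIdx]
  simp only [List.drop_zero]
  cases fuIdx v with
  | none => simp
  | some n =>
    have hn : (-1 : Int) < (n : Int) := by omega
    simp [hn]

-- ===== VERDICT =====
theorem GeneratedAllomorph_py_spec : Claim_equal_GeneratedAllomorph_py := by
  intro affix _ _
  unfold Spec_GeneratedAllomorph_py GeneratedAllomorph_py GeneratedAllomorph_py_alt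
  simp only [expandDescB_nil]
  by_cases hp : PySem.List.pyGet? affix.toList 0 == some '('
  · simp only [hp, if_pos, double_replace_filter]
    set v1 := affix.toList.filter (fun c => !(c == '(' || c == ')')) with hv1
    set v2 := PySem.List.slice affix.toList (some (PySem.Chars.find affix.toList [')'] + 1)) none with hv2
    by_cases h1 : ucLoopA v1 0 > -1
    · obtain ⟨e1, he1⟩ : ∃ e, expandB v1 = some e := by
        cases he : expandB v1 with
        | none => exact absurd ((ucLoop_none_iff v1).mpr he) (by simpa using h1)
        | some e => exact ⟨e, rfl⟩
      have hA : genAppendA v1 (ucLoopA v1 0).toNat [] = e1 := by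
        have hcore := core_eq v1 ([] : List String)
        rw [if_pos h1, he1] at hcore
        simpa using hcore
      simp only [h1, if_pos, hA, he1, core_eq v2 e1]
    · have hnone : expandB v1 = none := (ucLoop_none_iff v1).mp h1
      simp [h1, hnone]
  · simp only [hp, Bool.false_eq_true, if_false]
    by_cases h1 : ucLoopA affix.toList 0 > -1
    · obtain ⟨e, he⟩ : ∃ e, expandB affix.toList = some e := by
        cases hx : expandB affix.toList with
        | none => exact absurd ((ucLoop_none_iff _).mpr hx) (by simpa using h1)
        | some e => exact ⟨e, rfl⟩
      have hA : genAppendA affix.toList (ucLoopA affix.toList 0).toNat [] = e := by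
        have hcore := core_eq affix.toList ([] : List String)
        rw [if_pos h1, he] at hcore
        simpa using hcore
      have h0 : ucLoopA ([] : List Char) 0 = -1 := by rw [ucLoopA]; simp
      simp [h1, h0, hA, he]
    · have hnone : expandB affix.toList = none := (ucLoop_none_iff _).mp h1
      simp [h1, hnone]
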